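-- pv_equiv track=rewrite | github.com/Skyffox/Advent-of-Code | 2024/day12.py | find_consecutive_positions
-- ===== SOURCE A (Python) =====
-- from typing import List, Tuple
--
-- def find_consecutive_positions(positions: List[Tuple[int, int]], check_vertical: bool = False) -> List[List[Tuple[int, int]]]:
--     """
--     Find sequences of the same value for a given coordinate.
--
--     Args:
--         positions (list): List of (x, y) coordinates.
--         check_vertical (bool): If True, checks vertical alignment. Default is horizontal.
--
--     Returns:
--         list: Groups of consecutive aligned coordinates.
--     """
--     # Sort the positions first by x-coordinate (row) and then by y-coordinate (column)
--     sorted_positions = sorted(positions)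
--     x, y = 0, 1
--
--     if check_vertical:
--         # Find vertical sequences (same column, consecutive rows)
--         sorted_positions = sorted(positions, key=lambda x: (x[1], x[0]))
--         x, y = y, x
--
--     groups = []
--
--     current_group = []
--     for idx, pos in enumerate(sorted_positions):
--         if not current_group:
--             current_group.append(pos)
--         else:
--             if pos[x] == sorted_positions[idx-1][x] and pos[y] == sorted_positions[idx-1][y] + 1:
--                 current_group.append(pos)
--             else:
--                 if len(current_group) > 1:
--                     groups.append(current_group)
--                 current_group = [pos]
--
--     if len(current_group) > 1:
--         groups.append(current_group)
--
--     return groups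
-- ===== SOURCE B (Python) =====
-- from typing import List, Tuple
--
-- def find_consecutive_positions(positions: List[Tuple[int, int]], check_vertical: bool = False) -> List[List[Tuple[int, int]]]:
--     """Hash-set chain detection: a coordinate starts a chain iff its aligned
--     predecessor is absent from the set; each chain is produced by walking
--     successor membership, no adjacent-element comparison of the sorted list."""
--     if check_vertical:
--         key = lambda p: (p[1], p[0])
--         pred = lambda p: (p[0] - 1, p[1])
--         succ = lambda p: (p[0] + 1, p[1])
--     else:
--         key = lambda p: (p[0], p[1])
--         pred = lambda p: (p[0], p[1] - 1)
--         succ = lambda p: (p[0], p[1] + 1)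
--     present = set(positions)
--     groups = []
--     for p in sorted(present, key=key):
--         if pred(p) not in present:
--             chain = [p]
--             q = succ(p)
--             while q in present:
--                 chain.append(q)
--                 q = succ(q)
--             if len(chain) > 1:
--                 groups.append(chain)
--     return groups
-- ===== Notes on version B (the rewrite author's own statement) =====
-- stated objective: alternative
-- what changed: Replaces A's adjacent-element comparison scan of the sorted list by hash-set chain detection: a coordinate starts a chain iff its aligned predecessor is absent from the set of positions, and each chain is produced by walking successor membership in that set; Pre_ excludes lists with duplicate coordinates, on which A's splitting of a run at each repeated sorted element is an accidental corner that B's set-based grouping resolves the other defensible way.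
import Mathlib
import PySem

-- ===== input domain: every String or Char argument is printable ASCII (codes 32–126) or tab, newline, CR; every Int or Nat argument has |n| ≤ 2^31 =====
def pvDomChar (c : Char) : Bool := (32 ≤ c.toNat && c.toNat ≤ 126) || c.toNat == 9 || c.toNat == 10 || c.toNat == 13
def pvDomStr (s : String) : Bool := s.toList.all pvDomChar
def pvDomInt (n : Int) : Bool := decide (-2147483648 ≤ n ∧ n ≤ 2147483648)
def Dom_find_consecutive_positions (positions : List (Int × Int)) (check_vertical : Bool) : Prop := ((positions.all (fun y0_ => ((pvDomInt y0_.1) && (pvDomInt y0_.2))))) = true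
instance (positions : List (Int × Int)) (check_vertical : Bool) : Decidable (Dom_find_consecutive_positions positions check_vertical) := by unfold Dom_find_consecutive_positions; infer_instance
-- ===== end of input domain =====

-- B replaces A's adjacent-comparison scan of the sorted list by hash-set chain detection:
-- a coordinate starts a chain iff its aligned predecessor is absent from the set, and each
-- chain is produced by walking successor membership (objective: alternative algorithm).


-- ===== PORT A =====
-- sorted(positions) on int pairs is the lexicographic (fst, snd) sort: PySem.List.sorted2.
def find_consecutive_positions (positions : List (Int × Int)) (check_vertical : Bool) : List (List (Int × Int)) :=
  let sorted_positions :=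
    if check_vertical then PySem.List.sorted2 positions (fun p => p.2) (fun p => p.1)
    else PySem.List.sorted2 positions (fun p => p.1) (fun p => p.2)
  let x : Int := if check_vertical then 1 else 0
  let y : Int := if check_vertical then 0 else 1
  -- pos[x] for x ∈ {0, 1} on a pair
  let getI : (Int × Int) → Int → Int := fun p i => if i == 0 then p.1 else p.2
  let res := (PySem.List.enumerate sorted_positions).foldl
    (fun st ip =>
      let groups := st.1
      let current_group := st.2
      let idx := ip.1
      let pos := ip.2
      if current_group.isEmpty then (groups, current_group ++ [pos])
      else
        -- sorted_positions[idx-1]; in range on every reached path (idx ≥ 1 here)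
        let prev := (PySem.List.pyGet? sorted_positions (idx - 1)).getD (0, 0)
        if getI pos x == getI prev x && getI pos y == getI prev y + 1 then
          (groups, current_group ++ [pos])
        else
          ((if current_group.length > 1 then groups ++ [current_group] else groups), [pos]))
    ([], [])
  if res.2.length > 1 then res.1 ++ [res.2] else res.1

-- ===== PORT B =====
def pvPred (cv : Bool) (p : Int × Int) : Int × Int := if cv then (p.1 - 1, p.2) else (p.1, p.2 - 1)
def pvSucc (cv : Bool) (p : Int × Int) : Int × Int := if cv then (p.1 + 1, p.2) else (p.1, p.2 + 1)

-- the 'while q in present: chain.append(q); q = succ(q)' loop; fuel |present| always suffices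
-- (the visited members are distinct and never the chain start, see pvWalk_eq_chainSplit below)
def pvWalk (present : List (Int × Int)) (cv : Bool) : Nat → (Int × Int) → List (Int × Int)
  | 0, _ => []
  | n + 1, q => if present.contains q then q :: pvWalk present cv n (pvSucc cv q) else []

def find_consecutive_positions_alt (positions : List (Int × Int)) (check_vertical : Bool) : List (List (Int × Int)) :=
  let present : PySem.Set (Int × Int) := PySem.Set.ofList positions
  -- sorted(present, key=…): the key is injective on pairs, so the set's iteration order is immaterial
  let s := if check_vertical then PySem.List.sorted2 present (fun p => p.2) (fun p => p.1)
           else PySem.List.sorted2 present (fun p => p.1) (fun p => p.2)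
  s.foldl (fun groups p =>
    if present.contains (pvPred check_vertical p) then groups
    else
      let chain := p :: pvWalk present check_vertical present.length (pvSucc check_vertical p)
      if chain.length > 1 then groups ++ [chain] else groups) []

-- ===== PRECONDITION & SPEC =====
-- Pre_ excludes lists with duplicate coordinates: there A's splitting of a run at each repeated
-- sorted element is an accident of comparing adjacent duplicates, while B's set-based grouping
-- merges over the distinct coordinates; the corner is unspecified and both values are defensible.
def Pre_find_consecutive_positions (positions : List (Int × Int)) (check_vertical : Bool) : Prop := positions.Nodup
instance (positions : List (Int × Int)) (check_vertical : Bool) : Decidable (Pre_find_consecutive_positions positions check_vertical) := by unfold Pre_find_consecutive_positions; infer_instance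

def pvWitness_find_consecutive_positions : (List (Int × Int)) × Bool := ([(0, 2), (0, 3), (2, 1)], false)

def Spec_find_consecutive_positions (positions : List (Int × Int)) (check_vertical : Bool) (out : List (List (Int × Int))) : Prop := out = find_consecutive_positions_alt positions check_vertical
instance (positions : List (Int × Int)) (check_vertical : Bool) (out : List (List (Int × Int))) : Decidable (Spec_find_consecutive_positions positions check_vertical out) := by unfold Spec_find_consecutive_positions; infer_instance

-- ===== CLAIM (what is proved, stated in full; the proofs are below) =====
def Claim_equal_find_consecutive_positions : Prop := ∀ (positions : List (Int × Int)) (check_vertical : Bool), Dom_find_consecutive_positions positions check_vertical → Pre_find_consecutive_positions positions check_vertical → Spec_find_consecutive_positions positions check_vertical (find_consecutive_positions positions check_vertical)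

-- ===== LEMMAS AND PROOFS =====

-- the two coordinates of the sort key (primary, secondary) as functions of check_vertical
def pvK1 (cv : Bool) (p : Int × Int) : Int := if cv then p.2 else p.1
def pvK2 (cv : Bool) (p : Int × Int) : Int := if cv then p.1 else p.2

-- strict lexicographic order on the keys
def pvLt (cv : Bool) (a b : Int × Int) : Prop :=
  pvK1 cv a < pvK1 cv b ∨ (pvK1 cv a = pvK1 cv b ∧ pvK2 cv a < pvK2 cv b)

lemma pvKey_inj {cv : Bool} {p q : Int × Int} (h1 : pvK1 cv p = pvK1 cv q)
    (h2 : pvK2 cv p = pvK2 cv q) : p = q := by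
  cases cv <;> simp [pvK1, pvK2] at h1 h2 <;> exact Prod.ext (by omega) (by omega)

lemma pvK1_succ (cv : Bool) (p : Int × Int) : pvK1 cv (pvSucc cv p) = pvK1 cv p := by
  cases cv <;> simp [pvK1, pvSucc]

lemma pvK2_succ (cv : Bool) (p : Int × Int) : pvK2 cv (pvSucc cv p) = pvK2 cv p + 1 := by
  cases cv <;> simp [pvK2, pvSucc]

lemma pvK1_pred (cv : Bool) (p : Int × Int) : pvK1 cv (pvPred cv p) = pvK1 cv p := by
  cases cv <;> simp [pvK1, pvPred]

lemma pvK2_pred (cv : Bool) (p : Int × Int) : pvK2 cv (pvPred cv p) = pvK2 cv p - 1 := by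
  cases cv <;> simp [pvK2, pvPred]

lemma pvPred_succ (cv : Bool) (p : Int × Int) : pvPred cv (pvSucc cv p) = p := by
  cases cv <;> simp [pvPred, pvSucc]

lemma pvLt_asymm {cv : Bool} {a b : Int × Int} (h : pvLt cv a b) : ¬ pvLt cv b a := by
  unfold pvLt at *; omega

lemma pvLt_trans {cv : Bool} {a b c : Int × Int} (h1 : pvLt cv a b) (h2 : pvLt cv b c) :
    pvLt cv a c := by
  unfold pvLt at *; omega

lemma pvLt_total {cv : Bool} {a b : Int × Int} (h : a ≠ b) : pvLt cv a b ∨ pvLt cv b a := by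
  by_cases h1 : pvK1 cv a = pvK1 cv b
  · by_cases h2 : pvK2 cv a = pvK2 cv b
    · exact absurd (pvKey_inj h1 h2) h
    · unfold pvLt; omega
  · unfold pvLt; omega

lemma pvLt_succ_self (cv : Bool) (p : Int × Int) : pvLt cv p (pvSucc cv p) := by
  right; rw [pvK1_succ, pvK2_succ]; omega

lemma pvLt_pred_self (cv : Bool) (p : Int × Int) : pvLt cv (pvPred cv p) p := by
  right; rw [pvK1_pred, pvK2_pred]; omega

-- nothing lies strictly between p and succ p
lemma pvNot_between_succ {cv : Bool} {p r : Int × Int} (h1 : pvLt cv p r)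
    (h2 : pvLt cv r (pvSucc cv p)) : False := by
  rw [pvLt, pvK1_succ, pvK2_succ] at h2; rw [pvLt] at h1; omega

-- nothing lies strictly between pred q and q
lemma pvNot_between_pred {cv : Bool} {q r : Int × Int} (h1 : pvLt cv (pvPred cv q) r)
    (h2 : pvLt cv r q) : False := by
  rw [pvLt, pvK1_pred, pvK2_pred] at h1; rw [pvLt] at h2; omega

lemma pvSucc_ne_self (cv : Bool) (p : Int × Int) : pvSucc cv p ≠ p := by
  intro h
  have := pvK2_succ cv p
  rw [h] at this; omega

lemma pvPred_ne_self (cv : Bool) (p : Int × Int) : pvPred cv p ≠ p := by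
  intro h
  have := pvK2_pred cv p
  rw [h] at this; omega

-- the Boolean comparator sorted2 uses, for our keys
def pvLtB (cv : Bool) (a b : Int × Int) : Bool :=
  decide (pvK1 cv a < pvK1 cv b) || (!decide (pvK1 cv b < pvK1 cv a) && decide (pvK2 cv a < pvK2 cv b))

lemma pvLtB_iff (cv : Bool) (a b : Int × Int) : pvLtB cv a b = true ↔ pvLt cv a b := by
  unfold pvLtB pvLt
  simp only [Bool.or_eq_true, Bool.and_eq_true, Bool.not_eq_true', decide_eq_true_eq,
    decide_eq_false_iff_not]
  omega

lemma pvInsertBy_pairwise (cv : Bool) (x : Int × Int) :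
    ∀ (ys : List (Int × Int)), ys.Pairwise (pvLt cv) → x ∉ ys →
      (PySem.List.insertBy (pvLtB cv) x ys).Pairwise (pvLt cv)
  | [], _, _ => by simp [PySem.List.insertBy]
  | y :: ys, hp, hx => by
    rw [PySem.List.insertBy]
    by_cases h : pvLtB cv x y = true
    · rw [if_pos h]
      refine List.Pairwise.cons ?_ hp
      intro z hz
      rcases List.mem_cons.mp hz with rfl | hz
      · exact (pvLtB_iff cv x z).mp h
      · exact pvLt_trans ((pvLtB_iff cv x y).mp h) (List.rel_of_pairwise_cons hp hz)
    · rw [if_neg h]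
      rcases List.pairwise_cons.mp hp with ⟨hy, hys⟩
      have hxy : x ≠ y := fun he => hx (he ▸ List.mem_cons_self)
      have hnx : x ∉ ys := fun hm => hx (List.mem_cons_of_mem _ hm)
      refine List.pairwise_cons.mpr ⟨?_, pvInsertBy_pairwise cv x ys hys hnx⟩
      intro z hz
      rcases (PySem.List.mem_insertBy _ _ _ _).mp hz with hzx | hz
      · rw [hzx]
        rcases pvLt_total hxy with hlt | hlt
        · exact absurd ((pvLtB_iff cv x y).mpr hlt) h
        · exact hlt
      · exact hy z hz

lemma pvFoldl_insertBy_pairwise (cv : Bool) :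
    ∀ (xs acc : List (Int × Int)), (acc ++ xs).Nodup → acc.Pairwise (pvLt cv) →
      (xs.foldl (fun a x => PySem.List.insertBy (pvLtB cv) x a) acc).Pairwise (pvLt cv)
  | [], acc, _, hp => hp
  | x :: xs, acc, hnd, hp => by
    simp only [List.foldl_cons]
    have hperm : (PySem.List.insertBy (pvLtB cv) x acc ++ xs).Perm (acc ++ x :: xs) := by
      have h1 : (PySem.List.insertBy (pvLtB cv) x acc ++ xs).Perm ((x :: acc) ++ xs) :=
        (PySem.List.insertBy_perm _ _ _).append_right xs
      have h2 : ((x :: acc) ++ xs).Perm (acc ++ x :: xs) := by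
        simpa using (List.perm_middle (a := x) (l₁ := acc) (l₂ := xs)).symm
      exact h1.trans h2
    exact pvFoldl_insertBy_pairwise cv xs _ (hperm.nodup_iff.mpr hnd)
      (pvInsertBy_pairwise cv x acc hp
        (fun hm => (List.disjoint_of_nodup_append hnd) hm List.mem_cons_self))

-- the sorted list of a duplicate-free input is strictly increasing in the lexicographic key
lemma pvSorted2_pairwise (cv : Bool) (xs : List (Int × Int)) (h : xs.Nodup) :
    (PySem.List.sorted2 xs (fun p => pvK1 cv p) (fun p => pvK2 cv p) false).Pairwise (pvLt cv) := by
  have he : PySem.List.sorted2 xs (fun p => pvK1 cv p) (fun p => pvK2 cv p) false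
      = xs.foldl (fun a x => PySem.List.insertBy (pvLtB cv) x a) [] := rfl
  rw [he]
  exact pvFoldl_insertBy_pairwise cv xs [] (by simpa using h) (by simp)

-- in a strictly increasing list, succ q is a member iff it is the element right after q
lemma pvMem_succ_iff {cv : Bool} {s u rest : List (Int × Int)} {q : Int × Int}
    (hs : s.Pairwise (pvLt cv)) (he : s = u ++ q :: rest) :
    (pvSucc cv q ∈ s) ↔ rest.head? = some (pvSucc cv q) := by
  subst he
  rcases List.pairwise_append.mp hs with ⟨hu, hqr, hcross⟩
  rcases List.pairwise_cons.mp hqr with ⟨hq, hrest⟩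
  constructor
  · intro hmem
    rcases List.mem_append.mp hmem with hmu | hmr
    · exact absurd (pvLt_succ_self cv q) (pvLt_asymm (hcross _ hmu q List.mem_cons_self))
    · rcases List.mem_cons.mp hmr with heq | hmr
      · exact absurd heq (pvSucc_ne_self cv q)
      · cases rest with
        | nil => simp at hmr
        | cons r rest2 =>
          rcases List.mem_cons.mp hmr with rfl | hmr2
          · rfl
          · exact absurd (List.rel_of_pairwise_cons hrest hmr2)
              (fun h2 => pvNot_between_succ (hq r List.mem_cons_self) h2)
  · intro hh
    cases rest with
    | nil => simp at hh
    | cons r rest2 =>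
      simp only [List.head?_cons, Option.some.injEq] at hh
      exact List.mem_append.mpr (Or.inr (List.mem_cons_of_mem _ (hh ▸ List.mem_cons_self)))

-- in a strictly increasing list, pred q is a member iff it is the element right before q
lemma pvMem_pred_iff {cv : Bool} {s u rest : List (Int × Int)} {q : Int × Int}
    (hs : s.Pairwise (pvLt cv)) (he : s = u ++ q :: rest) :
    (pvPred cv q ∈ s) ↔ u.getLast? = some (pvPred cv q) := by
  subst he
  rcases List.pairwise_append.mp hs with ⟨hu, hqr, hcross⟩
  rcases List.pairwise_cons.mp hqr with ⟨hq, _⟩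
  have hnotr : pvPred cv q ∉ q :: rest := by
    intro hm
    rcases List.mem_cons.mp hm with heq | hmr
    · exact pvPred_ne_self cv q heq
    · exact pvLt_asymm (hq _ hmr) (pvLt_pred_self cv q)
  constructor
  · intro hmem
    have hmu : pvPred cv q ∈ u := by
      rcases List.mem_append.mp hmem with h | h
      · exact h
      · exact absurd h hnotr
    rcases List.eq_nil_or_concat u with rfl | ⟨u', l, rfl⟩
    · simp at hmu
    · simp only [List.concat_eq_append] at hmu hu hcross ⊢
      rw [List.getLast?_concat]
      rcases List.mem_append.mp hmu with hmu' | hml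
      · rcases List.pairwise_append.mp hu with ⟨_, _, hcr'⟩
        have h1 : pvLt cv (pvPred cv q) l := hcr' _ hmu' l List.mem_cons_self
        have h2 : pvLt cv l q := hcross l (by simp) q List.mem_cons_self
        exact absurd h1 (fun h => pvNot_between_pred h h2)
      · simp at hml
        exact congrArg some hml.symm
  · intro hh
    have : pvPred cv q ∈ u := List.mem_of_getLast? hh
    exact List.mem_append.mpr (Or.inl this)

-- split off the maximal +1 chain continuing prev
def pvChainSplit (cv : Bool) (prev : Int × Int) : List (Int × Int) → List (Int × Int) × List (Int × Int)
  | [] => ([], [])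
  | r :: rest =>
    if r = pvSucc cv prev then
      ((r :: (pvChainSplit cv r rest).1), (pvChainSplit cv r rest).2)
    else ([], r :: rest)

lemma pvChainSplit_append (cv : Bool) :
    ∀ (l : List (Int × Int)) (prev : Int × Int),
      (pvChainSplit cv prev l).1 ++ (pvChainSplit cv prev l).2 = l
  | [], _ => rfl
  | r :: rest, prev => by
    rw [pvChainSplit]
    by_cases h : r = pvSucc cv prev
    · simp only [if_pos h, List.cons_append, pvChainSplit_append cv rest r]
    · simp [if_neg h]

lemma pvChainSplit_snd_length (cv : Bool) :
    ∀ (l : List (Int × Int)) (prev : Int × Int),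
      (pvChainSplit cv prev l).2.length ≤ l.length
  | [], _ => by simp [pvChainSplit]
  | r :: rest, prev => by
    rw [pvChainSplit]
    by_cases h : r = pvSucc cv prev
    · simp only [if_pos h]
      exact le_trans (pvChainSplit_snd_length cv rest r) (Nat.le_succ _)
    · simp [if_neg h]

-- the reference result: maximal +1 chains of the sorted list, singletons dropped
def pvRuns (cv : Bool) : List (Int × Int) → List (List (Int × Int))
  | [] => []
  | p :: rest =>
    (if (p :: (pvChainSplit cv p rest).1).length > 1 then [p :: (pvChainSplit cv p rest).1] else [])
      ++ pvRuns cv (pvChainSplit cv p rest).2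
  termination_by l => l.length
  decreasing_by
    exact Nat.lt_succ_of_le (pvChainSplit_snd_length cv rest p)

-- A's flat pass, reformulated with the previous element carried along (prev = s[idx-1])
def pvScanFrom (prim sec : (Int × Int) → Int) (prev : Int × Int) (run : List (Int × Int))
    (groups : List (List (Int × Int))) : List (Int × Int) → List (List (Int × Int))
  | [] => if run.length > 1 then groups ++ [run] else groups
  | p :: rest =>
    if prim p == prim prev && sec p == sec prev + 1 then
      pvScanFrom prim sec p (run ++ [p]) groups rest
    else
      pvScanFrom prim sec p [p] (if run.length > 1 then groups ++ [run] else groups) rest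

-- A's generic step function (the fold body of the port, with prim/sec extracted)
def pvStepA (s : List (Int × Int)) (prim sec : (Int × Int) → Int)
    (st : List (List (Int × Int)) × List (Int × Int)) (ip : Int × (Int × Int)) :
    List (List (Int × Int)) × List (Int × Int) :=
  if st.2.isEmpty then (st.1, st.2 ++ [ip.2])
  else
    let prev := (PySem.List.pyGet? s (ip.1 - 1)).getD (0, 0)
    if prim ip.2 == prim prev && sec ip.2 == sec prev + 1 then (st.1, st.2 ++ [ip.2])
    else ((if st.2.length > 1 then st.1 ++ [st.2] else st.1), [ip.2])

lemma pvA_fold_eq_scanFrom (prim sec : (Int × Int) → Int) (s : List (Int × Int)) :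
    ∀ (rest : List (Int × Int)) (k : Nat) (groups : List (List (Int × Int)))
      (run : List (Int × Int)) (prev : Int × Int),
      s.drop k = rest → 1 ≤ k → s[k - 1]? = some prev → run ≠ [] →
      (let r := (PySem.List.enumerate rest (k : Int)).foldl (pvStepA s prim sec) (groups, run)
       if r.2.length > 1 then r.1 ++ [r.2] else r.1)
        = pvScanFrom prim sec prev run groups rest := by
  intro rest
  induction rest with
  | nil =>
    intro k groups run prev _ _ _ _
    simp [PySem.List.enumerate_nil, pvScanFrom]
  | cons q rs ih =>
    intro k groups run prev hdrop hk hprev hrun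
    have hq : s[k]? = some q := by
      have := (List.getElem?_drop (xs := s) (i := k) (j := 0)).symm
      simp [hdrop] at this; simpa using this
    have hdrop' : s.drop (k + 1) = rs := by rw [← List.drop_drop, hdrop]; rfl
    have hcast : ((k : Int) - 1) = ((k - 1 : Nat) : Int) := by omega
    have hlook : (PySem.List.pyGet? s ((k : Int) - 1)).getD (0, 0) = prev := by
      rw [hcast, PySem.List.pyGet?_natCast, hprev]; rfl
    rw [PySem.List.enumerate_cons]
    simp only [List.foldl_cons]
    have hstep : pvStepA s prim sec (groups, run) ((k : Int), q)
        = if prim q == prim prev && sec q == sec prev + 1 then (groups, run ++ [q])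
          else ((if run.length > 1 then groups ++ [run] else groups), [q]) := by
      simp [pvStepA, List.isEmpty_iff, hrun, hlook]
    rw [hstep]
    have hcast2 : ((k : Int) + 1) = ((k + 1 : Nat) : Int) := by omega
    by_cases hc : prim q == prim prev && sec q == sec prev + 1
    · rw [if_pos hc]
      rw [hcast2, ih (k + 1) groups (run ++ [q]) q hdrop' (by omega) (by simpa using hq) (by simp)]
      simp [pvScanFrom, hc]
    · rw [if_neg hc]
      rw [hcast2, ih (k + 1) (if run.length > 1 then groups ++ [run] else groups) [q] q hdrop'
        (by omega) (by simpa using hq) (by simp)]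
      simp [pvScanFrom, hc]

-- A's continuation test recognises exactly the lexicographic successor
lemma pvCond_iff (cv : Bool) (r prev : Int × Int) :
    (pvK1 cv r == pvK1 cv prev && pvK2 cv r == pvK2 cv prev + 1) = true ↔ r = pvSucc cv prev := by
  simp only [Bool.and_eq_true, beq_iff_eq]
  constructor
  · rintro ⟨h1, h2⟩
    exact pvKey_inj (h1.trans (pvK1_succ cv prev).symm) (h2.trans (pvK2_succ cv prev).symm)
  · rintro rfl
    exact ⟨pvK1_succ cv prev, pvK2_succ cv prev⟩

lemma pvScanFrom_eq_runs (cv : Bool) :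
    ∀ (rest : List (Int × Int)) (prev : Int × Int) (run : List (Int × Int))
      (groups : List (List (Int × Int))),
      pvScanFrom (fun p => pvK1 cv p) (fun p => pvK2 cv p) prev run groups rest =
        groups ++ (if (run ++ (pvChainSplit cv prev rest).1).length > 1
                   then [run ++ (pvChainSplit cv prev rest).1] else [])
          ++ pvRuns cv (pvChainSplit cv prev rest).2
  | [], prev, run, groups => by
    simp only [pvScanFrom, pvChainSplit, pvRuns, List.append_nil]
    by_cases h : run.length > 1 <;> simp [h]
  | r :: rest', prev, run, groups => by
    by_cases hr : r = pvSucc cv prev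
    · have hc : (pvK1 cv r == pvK1 cv prev && pvK2 cv r == pvK2 cv prev + 1) = true :=
        (pvCond_iff cv r prev).mpr hr
      rw [pvScanFrom, if_pos hc, pvChainSplit, if_pos hr,
        pvScanFrom_eq_runs cv rest' r (run ++ [r]) groups]
      simp
    · have hc : ¬ ((pvK1 cv r == pvK1 cv prev && pvK2 cv r == pvK2 cv prev + 1) = true) :=
        fun h => hr ((pvCond_iff cv r prev).mp h)
      rw [pvScanFrom, if_neg hc, pvChainSplit, if_neg hr,
        pvScanFrom_eq_runs cv rest' r [r]
          (if run.length > 1 then groups ++ [run] else groups)]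
      rw [pvRuns]
      by_cases h : run.length > 1 <;> simp [h]

-- A's whole pass over a sorted list s computes pvRuns cv s
lemma pvA_eq_runs (cv : Bool) (s : List (Int × Int)) :
    (let r := (PySem.List.enumerate s (0 : Int)).foldl
        (pvStepA s (fun p => pvK1 cv p) (fun p => pvK2 cv p)) ([], [])
     if r.2.length > 1 then r.1 ++ [r.2] else r.1) = pvRuns cv s := by
  cases s with
  | nil => simp [PySem.List.enumerate_nil, pvRuns]
  | cons p rest =>
    rw [PySem.List.enumerate_cons]
    simp only [List.foldl_cons]
    have hstep : pvStepA (p :: rest) (fun p => pvK1 cv p) (fun p => pvK2 cv p) ([], []) ((0 : Int), p)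
        = ([], [p]) := by
      simp [pvStepA]
    rw [hstep]
    have h1 : ((0 : Int) + 1) = ((1 : Nat) : Int) := by norm_num
    rw [h1, pvA_fold_eq_scanFrom (fun p => pvK1 cv p) (fun p => pvK2 cv p) (p :: rest) rest 1 [] [p] p
      (by rfl) (by omega) (by simp) (by simp)]
    rw [pvScanFrom_eq_runs cv rest p [p] [], pvRuns]
    simp

-- B's per-element contribution
def pvGB (present : List (Int × Int)) (cv : Bool) (p : Int × Int) : List (List (Int × Int)) :=
  if present.contains (pvPred cv p) then []
  else
    let chain := p :: pvWalk present cv present.length (pvSucc cv p)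
    if chain.length > 1 then [chain] else []

-- the membership walk collects exactly the adjacent +1 chain of the sorted list
lemma pvWalk_eq_chainSplit {cv : Bool} {present s : List (Int × Int)}
    (hs : s.Pairwise (pvLt cv)) (hmem : ∀ x, x ∈ present ↔ x ∈ s) :
    ∀ (rest : List (Int × Int)) (fuel : Nat) (u : List (Int × Int)) (q : Int × Int),
      s = u ++ q :: rest → rest.length < fuel →
      pvWalk present cv fuel (pvSucc cv q) = (pvChainSplit cv q rest).1
  | [], fuel, u, q, he, hf => by
    cases fuel with
    | zero => omega
    | succ n =>
      rw [pvWalk]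
      have : ¬ (pvSucc cv q ∈ present) := by
        rw [hmem, pvMem_succ_iff hs he]
        simp
      rw [if_neg (by simpa using this)]
      rfl
  | r :: rest', fuel, u, q, he, hf => by
    cases fuel with
    | zero => omega
    | succ n =>
      rw [pvWalk, pvChainSplit]
      by_cases hr : r = pvSucc cv q
      · have hin : pvSucc cv q ∈ present := by
          rw [hmem, he]
          exact List.mem_append.mpr (Or.inr (List.mem_cons_of_mem _ (hr ▸ List.mem_cons_self)))
        rw [if_pos (by simpa using hin), if_pos hr]
        subst hr
        rw [pvWalk_eq_chainSplit hs hmem rest' n (u ++ [q]) (pvSucc cv q)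
          (by rw [he]; simp) (by simp at hf; omega)]
      · have hnin : ¬ (pvSucc cv q ∈ present) := by
          rw [hmem, pvMem_succ_iff hs he]
          intro hh
          simp only [List.head?_cons, Option.some.injEq] at hh
          exact hr hh
        rw [if_neg (by simpa using hnin), if_neg hr]

-- every element of the chain has its predecessor in the set, so B emits nothing for it
lemma pvChain_flatMap_nil (cv : Bool) (present : List (Int × Int)) :
    ∀ (rest : List (Int × Int)) (q : Int × Int), q ∈ present → (∀ x ∈ rest, x ∈ present) →
      ((pvChainSplit cv q rest).1).flatMap (pvGB present cv) = []
  | [], q, _, _ => rfl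
  | r :: rest', q, hq, hall => by
    rw [pvChainSplit]
    by_cases hr : r = pvSucc cv q
    · rw [if_pos hr]
      simp only [List.flatMap_cons]
      have hgb : pvGB present cv r = [] := by
        unfold pvGB
        rw [if_pos]
        rw [hr, pvPred_succ]
        simpa using hq
      rw [hgb,
        pvChain_flatMap_nil cv present rest' r (hall r List.mem_cons_self)
          (fun x hx => hall x (List.mem_cons_of_mem _ hx))]
      rfl
    · rw [if_neg hr]; rfl

-- rem never begins with the successor of the chain's last element
lemma pvChainSplit_rem_head (cv : Bool) :
    ∀ (rest : List (Int × Int)) (q r : Int × Int) (rem' : List (Int × Int)),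
      (pvChainSplit cv q rest).2 = r :: rem' →
      r ≠ pvSucc cv ((pvChainSplit cv q rest).1.getLastD q)
  | [], q, r, rem', h => by simp [pvChainSplit] at h
  | r0 :: rest', q, r, rem', h => by
    rw [pvChainSplit] at h ⊢
    by_cases hr : r0 = pvSucc cv q
    · rw [if_pos hr] at h ⊢
      simp only at h ⊢
      rw [List.getLastD_cons]
      exact pvChainSplit_rem_head cv rest' r0 r rem' h
    · rw [if_neg hr] at h ⊢
      simp only [List.cons.injEq] at h
      rw [h.1] at hr
      simpa using hr

-- B's pass over a sorted list computes pvRuns on every chain-start-aligned suffix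
lemma pvFlatMap_eq_runs {cv : Bool} {present s : List (Int × Int)}
    (hs : s.Pairwise (pvLt cv)) (hmem : ∀ x, x ∈ present ↔ x ∈ s)
    (hlen : present.length = s.length) :
    ∀ (n : Nat) (v u : List (Int × Int)), v.length ≤ n → s = u ++ v →
      (∀ r, v.head? = some r → u.getLast? ≠ some (pvPred cv r)) →
      v.flatMap (pvGB present cv) = pvRuns cv v := by
  intro n
  induction n with
  | zero =>
    intro v u hlv _ _
    have : v = [] := List.eq_nil_of_length_eq_zero (Nat.le_zero.mp hlv)
    subst this; simp [pvRuns]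
  | succ n ih =>
    intro v u hlv he hstart
    cases v with
    | nil => simp [pvRuns]
    | cons p rest =>
      have hpred_not : ¬ (pvPred cv p ∈ present) := by
        rw [hmem, pvMem_pred_iff hs he]
        exact fun h => hstart p rfl h
      have hfuel : rest.length < present.length := by
        rw [hlen, he]; simp only [List.length_append, List.length_cons]; omega
      have hwalk : pvWalk present cv present.length (pvSucc cv p) = (pvChainSplit cv p rest).1 :=
        pvWalk_eq_chainSplit hs hmem rest present.length u p he hfuel
      have hgb : pvGB present cv p =
          (if (p :: (pvChainSplit cv p rest).1).length > 1
           then [p :: (pvChainSplit cv p rest).1] else []) := by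
        unfold pvGB
        rw [if_neg (by simpa using hpred_not), hwalk]
      have hsplit := pvChainSplit_append cv rest p
      set c := (pvChainSplit cv p rest).1 with hc
      set rem := (pvChainSplit cv p rest).2 with hrem
      have hrest : rest = c ++ rem := hsplit.symm
      have hchain_nil : c.flatMap (pvGB present cv) = [] := by
        refine pvChain_flatMap_nil cv present rest p ?_ ?_
        · rw [hmem, he]; simp
        · intro x hx
          rw [hmem, he]
          exact List.mem_append.mpr (Or.inr (List.mem_cons_of_mem _ hx))
      have hrec : rem.flatMap (pvGB present cv) = pvRuns cv rem := by
        refine ih rem (u ++ p :: c) ?_ ?_ ?_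
        · have h1 : rem.length ≤ rest.length := pvChainSplit_snd_length cv rest p
          have h2 : rest.length ≤ n := by simpa using Nat.lt_succ_iff.mp (by simpa using hlv)
          omega
        · rw [he, hrest]; simp
        · intro r hr hlast
          cases hrm : rem with
          | nil => rw [hrm] at hr; simp at hr
          | cons r1 rem' =>
            rw [hrm] at hr
            simp only [List.head?_cons, Option.some.injEq] at hr
            rw [← hr] at hlast
            have hne := pvChainSplit_rem_head cv rest p r1 rem' (by rw [← hrem, hrm])
            rw [← hc] at hne
            have hlast' : (u ++ p :: c).getLast? = some ((p :: c).getLastD p) := by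
              rw [List.getLast?_append_of_ne_nil u (l₂ := p :: c) (by simp)]
              rw [List.getLastD_eq_getLast?]
              cases hgl : (p :: c).getLast? with
              | none => simp [List.getLast?_eq_none_iff] at hgl
              | some a => rfl
            rw [hlast'] at hlast
            have : pvPred cv r1 = (p :: c).getLastD p := by
              injection hlast.symm
            have : r1 = pvSucc cv ((p :: c).getLastD p) := by
              rw [← this]
              cases cv <;> simp [pvPred, pvSucc]
            rw [List.getLastD_cons] at this
            exact hne this
      calc (p :: rest).flatMap (pvGB present cv)
          = pvGB present cv p ++ (c.flatMap (pvGB present cv) ++ rem.flatMap (pvGB present cv)) := by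
            rw [List.flatMap_cons, hrest, List.flatMap_append]
        _ = (if (p :: c).length > 1 then [p :: c] else []) ++ pvRuns cv rem := by
            rw [hgb, hchain_nil, hrec]; simp
        _ = pvRuns cv (p :: rest) := by rw [pvRuns]

-- ===== VERDICT (by name: the statement is the Claim_ definition above) =====
theorem find_consecutive_positions_spec : Claim_equal_find_consecutive_positions := by
  intro positions check_vertical _ hpre
  unfold Spec_find_consecutive_positions
  have hnd : positions.Nodup := hpre
  have hset : PySem.Set.ofList positions = positions :=
    PySem.Set.ofList_eq_self_of_nodup positions hnd
  cases check_vertical with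
  | false =>
    show find_consecutive_positions positions false = find_consecutive_positions_alt positions false
    unfold find_consecutive_positions find_consecutive_positions_alt
    simp only [if_neg (Bool.false_ne_true), hset]
    set s := PySem.List.sorted2 positions (fun p => p.1) (fun p => p.2) with hsdef
    have hperm : s.Perm positions := PySem.List.sorted2_perm _ _ _ _
    have hs : s.Pairwise (pvLt false) := pvSorted2_pairwise false positions hnd
    have hmem : ∀ x, x ∈ positions ↔ x ∈ s := fun x => (hperm.mem_iff).symm
    have hlen : positions.length = s.length := hperm.length_eq.symm
    have hB : s.foldl (fun groups p =>
        if positions.contains (pvPred false p) then groups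
        else
          let chain := p :: pvWalk positions false positions.length (pvSucc false p)
          if chain.length > 1 then groups ++ [chain] else groups) []
        = s.flatMap (pvGB positions false) := by
      have hbody : (fun (groups : List (List (Int × Int))) (p : Int × Int) =>
          if positions.contains (pvPred false p) then groups
          else
            let chain := p :: pvWalk positions false positions.length (pvSucc false p)
            if chain.length > 1 then groups ++ [chain] else groups)
          = fun groups p => groups ++ pvGB positions false p := by
        funext groups p
        unfold pvGB
        split_ifs <;> simp <;> split <;> simp
      rw [hbody, PySem.List.foldl_append_eq_flatMap]
      rfl
    refine Eq.trans (pvA_eq_runs false s) ?_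
    exact (hB.trans (pvFlatMap_eq_runs hs hmem hlen s.length s [] le_rfl (by simp) (by simp))).symm
  | true =>
    show find_consecutive_positions positions true = find_consecutive_positions_alt positions true
    unfold find_consecutive_positions find_consecutive_positions_alt
    simp only [hset]
    set s := PySem.List.sorted2 positions (fun p => p.2) (fun p => p.1) with hsdef
    have hperm : s.Perm positions := PySem.List.sorted2_perm _ _ _ _
    have hs : s.Pairwise (pvLt true) := pvSorted2_pairwise true positions hnd
    have hmem : ∀ x, x ∈ positions ↔ x ∈ s := fun x => (hperm.mem_iff).symm
    have hlen : positions.length = s.length := hperm.length_eq.symm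
    have hB : s.foldl (fun groups p =>
        if positions.contains (pvPred true p) then groups
        else
          let chain := p :: pvWalk positions true positions.length (pvSucc true p)
          if chain.length > 1 then groups ++ [chain] else groups) []
        = s.flatMap (pvGB positions true) := by
      have hbody : (fun (groups : List (List (Int × Int))) (p : Int × Int) =>
          if positions.contains (pvPred true p) then groups
          else
            let chain := p :: pvWalk positions true positions.length (pvSucc true p)
            if chain.length > 1 then groups ++ [chain] else groups)
          = fun groups p => groups ++ pvGB positions true p := by
        funext groups p
        unfold pvGB
        split_ifs <;> simp <;> split <;> simp
      rw [hbody, PySem.List.foldl_append_eq_flatMap]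
      rfl
    refine Eq.trans (pvA_eq_runs true s) ?_
    exact (hB.trans (pvFlatMap_eq_runs hs hmem hlen s.length s [] le_rfl (by simp) (by simp))).symm
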